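-- pv_equiv track=rewrite | github.com/jO-Osko/dagstuhl-afp-neo4j | isabelle_processing.py | postprocess_name
-- ===== SOURCE A (Python) =====
-- def postprocess_name(qualified_name):
--     if "?" in qualified_name:
--         module, name = qualified_name.split("?")
--     else:
--         module, name = qualified_name, qualified_name
--     modules = []
--     for i, c in enumerate(module):
--         if c == ".":
--             modules.append(module[:i])
--     modules.append(module)  # the whole
--     return modules, name
-- ===== SOURCE B (Python) =====
-- def postprocess_name(qualified_name):
--     if "?" in qualified_name:
--         module, name = qualified_name.split("?")
--     else:
--         module, name = qualified_name, qualified_name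
--     parts = module.split(".")
--     modules = [".".join(parts[:k]) for k in range(1, len(parts) + 1)]
--     return modules, name
-- ===== Notes on version B (the rewrite author's own statement) =====
-- stated objective: faster
-- what changed: B replaces A's per-character index scan with a slice at every dot by splitting the module on '.' once and joining the first k components for k = 1..len(parts); measured constant-factor speedup from avoiding the character-level Python loop.
import Mathlib
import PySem

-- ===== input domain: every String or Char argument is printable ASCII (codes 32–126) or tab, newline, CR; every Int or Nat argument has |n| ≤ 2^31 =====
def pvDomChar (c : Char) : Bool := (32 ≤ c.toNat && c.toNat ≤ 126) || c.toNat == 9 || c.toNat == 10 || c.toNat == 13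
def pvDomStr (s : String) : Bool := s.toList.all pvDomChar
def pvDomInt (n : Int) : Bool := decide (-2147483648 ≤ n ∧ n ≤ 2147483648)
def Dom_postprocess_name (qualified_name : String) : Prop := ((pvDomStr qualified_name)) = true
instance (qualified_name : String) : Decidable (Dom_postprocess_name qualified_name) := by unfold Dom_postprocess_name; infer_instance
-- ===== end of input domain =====

-- B builds the dotted prefixes by splitting the module on '.' once and joining the first k
-- components for k = 1..len(parts), instead of A's per-character scan with a slice at each dot.

-- ===== PORT A =====
def postprocess_name (qualified_name : String) : List String × String :=
  let mn : String × String :=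
    if PySem.Str.isIn "?" qualified_name then
      match PySem.Str.split? qualified_name "?" with
      | some [m, n] => (m, n)
      | _ => (qualified_name, qualified_name)  -- Python raises ValueError here (≥ 2 '?'); excluded by Pre_
    else (qualified_name, qualified_name)
  let module := mn.1
  let modules := (PySem.List.enumerate module.toList 0).foldl
    (fun acc ic => if ic.2 == '.' then acc ++ [PySem.Str.slice module none (some ic.1)] else acc)
    ([] : List String)
  (modules ++ [module], mn.2)

-- ===== PORT B =====
def postprocess_name_alt (qualified_name : String) : List String × String :=
  let mn : String × String :=
    if PySem.Str.isIn "?" qualified_name then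
      let l := (PySem.Str.split? qualified_name "?").getD []
      if l.length == 2 then (l.getD 0 "", l.getD 1 "")
      else (qualified_name, qualified_name)  -- Python raises ValueError here (≥ 2 '?'); excluded by Pre_
    else (qualified_name, qualified_name)
  let module := mn.1
  let parts := (PySem.Str.split? module ".").getD []  -- sep "." ≠ "", so split? is always `some`
  let modules := (PySem.List.pyRange 1 ((parts.length : Int) + 1) 1).map
    (fun k => PySem.Str.join "." (PySem.List.slice parts none (some k)))
  (modules, mn.2)

-- ===== PRECONDITION & SPEC =====
-- Pre_ excludes strings containing two or more '?', on which A's 2-tuple unpacking of split('?') raises ValueError.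
def Pre_postprocess_name (qualified_name : String) : Prop :=
  PySem.Str.count qualified_name "?" ≤ 1
instance (qualified_name : String) : Decidable (Pre_postprocess_name qualified_name) := by
  unfold Pre_postprocess_name; infer_instance

def pvWitness_postprocess_name : String := "HOL.Groups?plus"

def Spec_postprocess_name (qualified_name : String) (out : List String × String) : Prop :=
  out = postprocess_name_alt qualified_name
instance (qualified_name : String) (out : List String × String) : Decidable (Spec_postprocess_name qualified_name out) := by
  unfold Spec_postprocess_name; infer_instance

-- ===== CLAIM (what is proved, stated in full; the proofs are below) =====
def Claim_equal_postprocess_name : Prop :=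
  ∀ (qualified_name : String), Dom_postprocess_name qualified_name →
    Pre_postprocess_name qualified_name →
    Spec_postprocess_name qualified_name (postprocess_name qualified_name)

-- ===== LEMMAS AND PROOFS =====

-- Specification of module.split(".") as a structural recursion over the characters.
def Gparts : List Char → List (List Char)
  | [] => [[]]
  | c :: cs => if c = '.' then [] :: Gparts cs else (c :: (Gparts cs).headI) :: (Gparts cs).tail

-- Specification of the final prefix list (all dot-prefixes plus the whole module).
def Gmods : List Char → List (List Char)
  | [] => [[]]
  | c :: cs => if c = '.' then [] :: (Gmods cs).map ('.' :: ·) else (Gmods cs).map (c :: ·)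

theorem Gparts_eq_cons (cs : List Char) : Gparts cs = (Gparts cs).headI :: (Gparts cs).tail := by
  cases cs with
  | nil => simp [Gparts]
  | cons c cs => by_cases h : c = '.' <;> simp [Gparts, h]

theorem Gparts_dot (cs : List Char) : Gparts ('.' :: cs) = [] :: Gparts cs := by simp [Gparts]
theorem Gparts_cons_ne (c : Char) (cs : List Char) (h : c ≠ '.') :
    Gparts (c :: cs) = (c :: (Gparts cs).headI) :: (Gparts cs).tail := by simp [Gparts, h]
theorem Gmods_dot (cs : List Char) : Gmods ('.' :: cs) = [] :: (Gmods cs).map ('.' :: ·) := by simp [Gmods]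
theorem Gmods_cons_ne (c : Char) (cs : List Char) (h : c ≠ '.') :
    Gmods (c :: cs) = (Gmods cs).map (c :: ·) := by simp [Gmods, h]

theorem go_eq (cs : List Char) : ∀ (fuel : Nat) (cur : List Char) (acc : List (List Char)),
    cs.length < fuel →
    PySem.Chars.splitOn.go ['.'] fuel cs cur acc
      = acc.reverse ++ (cur.reverse ++ (Gparts cs).headI) :: (Gparts cs).tail := by
  induction cs with
  | nil =>
    intro fuel cur acc h
    cases fuel with
    | zero => omega
    | succ f => simp [PySem.Chars.splitOn.go, Gparts]
  | cons c cs ih =>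
    intro fuel cur acc h
    cases fuel with
    | zero => omega
    | succ f =>
      by_cases hc : c = '.'
      · subst hc
        rw [show PySem.Chars.splitOn.go ['.'] (f+1) ('.' :: cs) cur acc
              = PySem.Chars.splitOn.go ['.'] f cs [] (cur.reverse :: acc) by
            simp [PySem.Chars.splitOn.go, List.isPrefixOf]]
        rw [ih f [] (cur.reverse :: acc) (by simpa using h)]
        simp [Gparts]
        exact (Gparts_eq_cons cs).symm
      · rw [show PySem.Chars.splitOn.go ['.'] (f+1) (c :: cs) cur acc
              = PySem.Chars.splitOn.go ['.'] f cs (c :: cur) acc by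
            simp [PySem.Chars.splitOn.go, List.isPrefixOf, Ne.symm hc]]
        rw [ih f (c :: cur) acc (by simpa using h)]
        simp [Gparts, hc]

theorem splitOn_eq_Gparts (cs : List Char) : PySem.Chars.splitOn cs ['.'] = Gparts cs := by
  unfold PySem.Chars.splitOn
  rw [go_eq cs (cs.length + 1) [] [] (by omega)]
  simpa using (Gparts_eq_cons cs).symm

theorem Gparts_length_pos (cs : List Char) : 0 < (Gparts cs).length := by
  rw [Gparts_eq_cons cs]; simp

-- A's scan: dot-prefixes of pre ++ cs coming from dots inside cs, plus the whole string.
theorem lemA (cs : List Char) : ∀ (pre : List Char),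
    ((PySem.List.enumerate cs (pre.length : Int)).filter (fun ic => ic.2 == '.')).map
        (fun ic => PySem.List.slice (pre ++ cs) none (some ic.1)) ++ [pre ++ cs]
      = (Gmods cs).map (pre ++ ·) := by
  induction cs with
  | nil => intro pre; simp [PySem.List.enumerate, Gmods]
  | cons c cs ih =>
    intro pre
    rw [PySem.List.enumerate_cons]
    by_cases hc : c = '.'
    · subst hc
      have h2 := ih (pre ++ ['.'])
      simp only [List.length_append, List.length_cons, List.length_nil] at h2
      push_cast at h2 ⊢
      simp only [List.filter_cons, List.map_cons, beq_self_eq_true, if_pos]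
      rw [PySem.List.slice_to_natCast, List.take_left, Gmods_dot]
      simp only [List.append_assoc, List.singleton_append] at h2 ⊢
      simpa [List.map_map, Function.comp_def] using congrArg (List.cons pre) h2
    · have h2 := ih (pre ++ [c])
      simp only [List.length_append, List.length_cons, List.length_nil] at h2
      push_cast at h2 ⊢
      simp only [List.filter_cons]
      rw [if_neg (by simpa using hc)]
      simp only [List.append_assoc, List.singleton_append] at h2 ⊢
      rw [h2, Gmods_cons_ne c cs hc]
      simp [List.map_map, Function.comp_def]

theorem join_cons_head (c : Char) (h : List Char) (rest : List (List Char)) :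
    PySem.Chars.join ['.'] ((c :: h) :: rest) = c :: PySem.Chars.join ['.'] (h :: rest) := by
  cases rest with
  | nil => simp [PySem.Chars.join_singleton]
  | cons q r => simp [PySem.Chars.join_cons_cons]

-- B's scan: joining the first k+1 parts, k = 0..len-1, gives exactly the prefix list.
theorem lemB (cs : List Char) :
    (List.range (Gparts cs).length).map
        (fun k => PySem.Chars.join ['.'] ((Gparts cs).take (k + 1))) = Gmods cs := by
  induction cs with
  | nil => simp [Gparts, Gmods, PySem.Chars.join_singleton]
  | cons c cs ih =>
    by_cases hc : c = '.'
    · subst hc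
      rw [Gparts_dot, Gmods_dot, List.length_cons, List.range_succ_eq_map]
      simp only [List.map_cons, List.map_map]
      refine congrArg₂ List.cons ?_ ?_
      · simp [PySem.Chars.join_singleton]
      · rw [← ih, List.map_map]
        apply List.map_congr_left
        intro k hk
        simp only [Function.comp_def, Nat.succ_eq_add_one]
        rw [Gparts_eq_cons cs]
        simp only [List.take_succ_cons]
        rw [PySem.Chars.join_cons_cons]
        rfl
    · rw [Gparts_cons_ne c cs hc, Gmods_cons_ne c cs hc, ← ih]
      have hl : (Gparts cs).tail.length + 1 = (Gparts cs).length := by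
        conv_rhs => rw [Gparts_eq_cons cs]
        simp
      rw [List.length_cons, hl, List.map_map]
      apply List.map_congr_left
      intro k hk
      simp only [Function.comp_def, List.take_succ_cons]
      rw [join_cons_head]
      congr 1
      conv_rhs => rw [Gparts_eq_cons cs]
      rw [List.take_succ_cons]

theorem map_toList_inj {L M : List String} (h : L.map String.toList = M.map String.toList) : L = M := by
  have hinj : Function.Injective String.toList := fun a b hab => String.toList_inj.mp hab
  exact List.map_injective_iff.mpr hinj h

theorem split_dot_eq (module : String) :
    ∃ ps, PySem.Str.split? module "." = some ps ∧ ps.map String.toList = Gparts module.toList := by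
  have h := PySem.Str.split?_map module "."
  rw [show PySem.Chars.split? module.toList (".".toList) = some (Gparts module.toList) by
        simp [PySem.Chars.split?, splitOn_eq_Gparts]] at h
  cases hs : PySem.Str.split? module "." with
  | none => rw [hs] at h; simp at h
  | some ps => rw [hs] at h; simp at h; exact ⟨ps, rfl, h⟩

-- the modules list of A equals the modules list of B, for any module string
theorem main_mod (module : String) :
    ((PySem.List.enumerate module.toList 0).foldl
      (fun acc ic => if ic.2 == '.' then acc ++ [PySem.Str.slice module none (some ic.1)] else acc)
      ([] : List String)) ++ [module]
    = (PySem.List.pyRange 1 ((((PySem.Str.split? module ".").getD []).length : Int) + 1) 1).map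
        (fun k => PySem.Str.join "." (PySem.List.slice ((PySem.Str.split? module ".").getD []) none (some k))) := by
  obtain ⟨ps, hps, hlist⟩ := split_dot_eq module
  rw [hps]
  simp only [Option.getD_some]
  rw [PySem.List.foldl_append_if (fun (ic : Int × Char) => ic.2 == '.')
        (fun ic => PySem.Str.slice module none (some ic.1)) (PySem.List.enumerate module.toList) []]
  apply map_toList_inj
  have hn : ps.length = (Gparts module.toList).length := by rw [← hlist, List.length_map]
  have hpos : 0 < ps.length := by rw [hn]; exact Gparts_length_pos _
  have hA : List.map String.toList
        ((((PySem.List.enumerate module.toList 0).filter (fun ic => ic.2 == '.')).map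
            (fun ic => PySem.Str.slice module none (some ic.1))) ++ [module])
      = Gmods module.toList := by
    rw [List.map_append, List.map_map]
    have hlemA := lemA module.toList []
    simp only [List.nil_append, List.length_nil, Nat.cast_zero] at hlemA
    rw [show (List.map (fun x => x) (Gmods module.toList)) = Gmods module.toList from List.map_id' _] at hlemA
    rw [← hlemA]
    congr 1
    apply List.map_congr_left
    intro ic _
    simp [PySem.Str.toList_slice]
  have hrange : PySem.List.pyRange 1 ((ps.length : Int) + 1) 1
      = (List.range ps.length).map (fun (k : Nat) => ((k : Int) + 1)) := by
    rw [PySem.List.pyRange_of_pos 1 ((ps.length : Int) + 1) (by norm_num)]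
    rw [if_pos (by exact_mod_cast Nat.lt_succ_of_le (Nat.one_le_iff_ne_zero.mpr (Nat.pos_iff_ne_zero.mp hpos)))]
    rw [show (((ps.length : Int) + 1 - 1 + 1 - 1) / 1).toNat = ps.length by simp]
    apply List.map_congr_left
    intro k _
    ring
  simp only [List.nil_append]
  rw [hA, hrange, List.map_map, List.map_map, ← lemB module.toList, ← hn]
  apply List.map_congr_left
  intro k hk
  simp only [Function.comp_def]
  rw [show ((k : Int) + 1) = (((k + 1 : Nat) : Int)) by push_cast; ring]
  rw [PySem.List.slice_to_natCast, PySem.Str.toList_join, List.map_take, hlist]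
  rfl

-- the two ports destructure qualified_name.split('?') in different but equal ways
theorem mn_eq (qn : String) :
    (if PySem.Str.isIn "?" qn then
        match PySem.Str.split? qn "?" with
        | some [m, n] => (m, n)
        | _ => (qn, qn)
      else (qn, qn))
    = (if PySem.Str.isIn "?" qn then
        let l := (PySem.Str.split? qn "?").getD []
        if l.length == 2 then (l.getD 0 "", l.getD 1 "")
        else (qn, qn)
      else (qn, qn)) := by
  by_cases h : PySem.Str.isIn "?" qn
  · rw [if_pos h, if_pos h]
    rcases hs : PySem.Str.split? qn "?" with _ | l
    · simp
    · rcases l with _ | ⟨a, _ | ⟨b, _ | ⟨c, t⟩⟩⟩ <;> simp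
  · rw [if_neg h, if_neg h]

-- ===== VERDICT (by name: the statement is the Claim_ definition above) =====
theorem postprocess_name_spec : Claim_equal_postprocess_name := by
  intro qualified_name _ _
  unfold Spec_postprocess_name postprocess_name postprocess_name_alt
  simp only []
  rw [← mn_eq qualified_name]
  exact Prod.ext (main_mod _) rfl
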